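-- pv_equiv track=rewrite | github.com/amanotaiga/liuyao | old/ganzhi.py | is_he
-- ===== SOURCE A (Python) =====
-- from enum import IntEnum
--
-- class DiZhi(IntEnum):
--     """
--     地支枚举 (Earthly Branches Enum)
--     """
--     Zi = 0      # 子
--     Chou = 1    # 丑
--     Yin = 2     # 寅
--     Mao = 3     # 卯
--     Chen = 4    # 辰
--     Si = 5      # 巳
--     Wu = 6      # 午
--     Wei = 7     # 未
--     Shen = 8    # 申
--     You = 9     # 酉
--     Xu = 10     # 戌
--     Hai = 11    # 亥
--
-- def is_he(zhi1: DiZhi, zhi2: DiZhi) -> bool: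
--     """
--     判断地支相合（六合）
--
--     地支六合是地支之间的合化关系，代表和谐、亲密、合作、喜庆。
--     相合主吉祥、团结、婚姻、缘分，力量较三合为弱。
--
--     六合对照及合化五行：
--     - 子丑合化土：子水配丑土，阴阳相合，水土相济，北方合（鼠牛合）
--     - 寅亥合化木：寅木配亥水，木得水生，木旺相生，东北合（虎猪合）
--     - 卯戌合化火：卯木配戌土，木火通明，文明之合，东西合（兔狗合）
--     - 辰酉合化金：辰土配酉金，土生金旺，金玉良缘，东南西合（龙鸡合）
--     - 巳申合化水：巳火配申金，火金相融，水火既济，南西合（蛇猴合）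
--     - 午未合化土：午火配未土，火土相生，中正之合，南方合（马羊合）
--
--     Args:
--         zhi1: 第一个地支
--         zhi2: 第二个地支
--
--     Returns:
--         True 如果两地支相合
--     """
--     he_pairs = [
--         (0, 1),    # 子(0)丑(1)合化土
--         (2, 11),   # 寅(2)亥(11)合化木
--         (3, 10),   # 卯(3)戌(10)合化火
--         (4, 9),    # 辰(4)酉(9)合化金
--         (5, 8),    # 巳(5)申(8)合化水
--         (6, 7)     # 午(6)未(7)合化土
--     ]
--
--     i1 = int(zhi1)
--     i2 = int(zhi2)
--
--     for a, b in he_pairs: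
--         if (i1 == a and i2 == b) or (i1 == b and i2 == a):
--             return True
--
--     return False
-- ===== SOURCE B (Python) =====
-- def is_he(zhi1, zhi2):
--     i1 = int(zhi1)
--     i2 = int(zhi2)
--     return 0 <= i1 <= 11 and 0 <= i2 <= 11 and (i1 + i2) % 12 == 1
-- ===== Notes on version B (the rewrite author's own statement) =====
-- stated objective: simpler
-- what changed: Replaces the six-pair table scan with the closed-form test (i1+i2) % 12 == 1 plus a 0..11 range check (all six harmony pairs, and only they, satisfy it in range).
import Mathlib
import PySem

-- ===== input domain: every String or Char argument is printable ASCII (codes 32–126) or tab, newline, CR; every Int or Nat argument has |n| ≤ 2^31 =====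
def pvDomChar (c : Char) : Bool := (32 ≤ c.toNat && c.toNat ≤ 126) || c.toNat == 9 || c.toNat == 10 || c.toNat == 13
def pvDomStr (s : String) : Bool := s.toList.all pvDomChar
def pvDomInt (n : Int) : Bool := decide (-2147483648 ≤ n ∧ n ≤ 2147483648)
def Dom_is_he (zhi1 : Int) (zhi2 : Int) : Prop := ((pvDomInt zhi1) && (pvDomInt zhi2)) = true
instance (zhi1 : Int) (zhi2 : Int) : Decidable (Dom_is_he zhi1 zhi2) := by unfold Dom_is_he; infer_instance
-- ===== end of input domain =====

-- ===== PORT A =====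
-- header: B replaces A's six-pair table scan with the closed-form test (zhi1+zhi2) % 12 == 1 plus a 0..11 range check (simpler).
def is_he (zhi1 : Int) (zhi2 : Int) : Bool :=
  let he_pairs : List (Int × Int) := [(0, 1), (2, 11), (3, 10), (4, 9), (5, 8), (6, 7)]
  -- for a, b in he_pairs: if ...: return True / return False
  he_pairs.any (fun p => (zhi1 == p.1 && zhi2 == p.2) || (zhi1 == p.2 && zhi2 == p.1))

-- ===== PORT B =====
def is_he_alt (zhi1 : Int) (zhi2 : Int) : Bool :=
  (0 ≤ zhi1 && zhi1 ≤ 11) && (0 ≤ zhi2 && zhi2 ≤ 11) && (PySem.Int.mod (zhi1 + zhi2) 12 == 1)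

-- ===== PRECONDITION & SPEC =====
def Spec_is_he (zhi1 : Int) (zhi2 : Int) (out : Bool) : Prop := out = is_he_alt zhi1 zhi2
instance (zhi1 : Int) (zhi2 : Int) (out : Bool) : Decidable (Spec_is_he zhi1 zhi2 out) := by unfold Spec_is_he; infer_instance

-- ===== CLAIM (what is proved, stated in full; the proofs are below) =====
def Claim_equal_is_he : Prop := ∀ (zhi1 : Int) (zhi2 : Int), Dom_is_he zhi1 zhi2 → Spec_is_he zhi1 zhi2 (is_he zhi1 zhi2)

-- ===== LEMMAS AND PROOFS =====

-- ===== VERDICT (by name: the statement is the Claim_ definition above) =====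
theorem is_he_spec : Claim_equal_is_he := by
  intro z1 z2 _
  unfold Spec_is_he
  by_cases h1 : 0 ≤ z1 ∧ z1 ≤ 11
  · by_cases h2 : 0 ≤ z2 ∧ z2 ≤ 11
    · obtain ⟨a, b⟩ := h1
      obtain ⟨c, d⟩ := h2
      interval_cases z1 <;> interval_cases z2 <;> decide
    · simp only [is_he, is_he_alt, List.any_cons, List.any_nil, Bool.or_false]
      rw [Bool.eq_iff_iff]
      simp only [Bool.or_eq_true, Bool.and_eq_true, beq_iff_eq, decide_eq_true_eq]
      constructor
      · intro h; exfalso; omega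
      · rintro ⟨⟨-, hr2⟩, -⟩; exact absurd hr2 h2
  · simp only [is_he, is_he_alt, List.any_cons, List.any_nil, Bool.or_false]
    rw [Bool.eq_iff_iff]
    simp only [Bool.or_eq_true, Bool.and_eq_true, beq_iff_eq, decide_eq_true_eq]
    constructor
    · intro h; exfalso; omega
    · rintro ⟨⟨hr1, -⟩, -⟩; exact absurd hr1 h1
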